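-- pv_equiv track=rewrite | github.com/Rishapriakanth/Python-programmes | password checker.py | check_passwords
-- ===== SOURCE A (Python) =====
-- def check_passwords(passwords):
--     n = len(passwords)
--     for i in range(n):
--         for j in range(i + 1, n):
--             if passwords[i] == passwords[j]:
--                 continue  # Skip identical passwords
--             min_len = min(len(passwords[i]), len(passwords[j]))
--             if passwords[i][:min_len] == passwords[j][:min_len]:
--                 return 'BAD PASSWORD'
--     return 'GOOD PASSWORD'
-- ===== SOURCE B (Python) =====
-- def check_passwords(passwords):
--     s = sorted(passwords)
--     for a, b in zip(s, s[1:]):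
--         if a != b and b.startswith(a):
--             return 'BAD PASSWORD'
--     return 'GOOD PASSWORD'
-- ===== Notes on version B (the rewrite author's own statement) =====
-- stated objective: faster
-- what changed: Sorts the list lexicographically and checks only adjacent pairs for a proper-prefix relation, instead of comparing all O(n^2) pairs.
import Mathlib
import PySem

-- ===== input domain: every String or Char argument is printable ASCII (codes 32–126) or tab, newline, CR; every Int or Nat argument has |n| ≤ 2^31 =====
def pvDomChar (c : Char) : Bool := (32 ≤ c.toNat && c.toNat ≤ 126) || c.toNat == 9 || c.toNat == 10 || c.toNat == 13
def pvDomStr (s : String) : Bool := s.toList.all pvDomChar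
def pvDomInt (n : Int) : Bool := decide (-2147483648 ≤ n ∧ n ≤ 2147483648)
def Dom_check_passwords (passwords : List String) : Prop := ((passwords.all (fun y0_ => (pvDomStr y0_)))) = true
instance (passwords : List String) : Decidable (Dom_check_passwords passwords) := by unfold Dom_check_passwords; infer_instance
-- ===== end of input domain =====

-- B sorts the list and checks only adjacent pairs for a proper-prefix relation instead of A's all-pairs scan.


-- ===== PORT A =====
def check_passwords (passwords : List String) : String :=
  if (PySem.List.pyRange 0 (PySem.List.len passwords) 1).any (fun i =>
       (PySem.List.pyRange (i + 1) (PySem.List.len passwords) 1).any (fun j =>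
         let pi := PySem.List.pyGetD passwords i ""
         let pj := PySem.List.pyGetD passwords j ""
         if pi == pj then false
         else
           let minLen := min (PySem.Str.len pi) (PySem.Str.len pj)
           PySem.List.slice pi.toList none (some minLen) ==
             PySem.List.slice pj.toList none (some minLen)))
  then "BAD PASSWORD" else "GOOD PASSWORD"

-- ===== PORT B =====
def check_passwords_alt (passwords : List String) : String :=
  if ((PySem.List.sorted passwords (fun x => x) false).zip
        (PySem.List.slice (PySem.List.sorted passwords (fun x => x) false) (some 1) none)).any
      (fun ab => ab.1 != ab.2 && PySem.Str.startswith ab.2 ab.1)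
  then "BAD PASSWORD" else "GOOD PASSWORD"

-- ===== PRECONDITION & SPEC =====
def Spec_check_passwords (passwords : List String) (out : String) : Prop := out = check_passwords_alt passwords
instance (passwords : List String) (out : String) : Decidable (Spec_check_passwords passwords out) := by unfold Spec_check_passwords; infer_instance

-- ===== CLAIM (what is proved, stated in full; the proofs are below) =====
def Claim_equal_check_passwords : Prop := ∀ (passwords : List String), Dom_check_passwords passwords → Spec_check_passwords passwords (check_passwords passwords)

-- ===== LEMMAS AND PROOFS =====

-- the property both programs detect: two distinct passwords, one a prefix of the other
def pvQ (l : List String) : Prop := ∃ x ∈ l, ∃ y ∈ l, x ≠ y ∧ x.toList <+: y.toList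

def pvF (ab : String × String) : Bool := ab.1 != ab.2 && PySem.Str.startswith ab.2 ab.1

lemma pv_lt_append {a t : List Char} (ht : t ≠ []) : a < a ++ t := by
  induction a with
  | nil => cases t with
    | nil => exact absurd rfl ht
    | cons u t' => exact List.Lex.nil
  | cons x a' ih => exact List.Lex.cons ih

lemma pv_proper_prefix_lt {a c : List Char} (h : a <+: c) (hne : a ≠ c) : a < c := by
  obtain ⟨t, rfl⟩ := h
  apply pv_lt_append
  intro ht; subst ht; simp at hne

lemma pv_not_cons_le_nil (x : Char) (l : List Char) : ¬ ((x :: l : List Char) ≤ ([] : List Char)) := by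
  intro h
  rcases lt_or_eq_of_le h with h | h
  · cases h
  · simp at h

lemma pv_cons_le_cons_iff {x y : Char} {l₁ l₂ : List Char} :
    (x :: l₁ : List Char) ≤ y :: l₂ ↔ x < y ∨ (x = y ∧ l₁ ≤ l₂) := by
  constructor
  · intro h
    rcases lt_or_eq_of_le h with h | h
    · cases h with
      | cons h' => exact Or.inr ⟨rfl, le_of_lt h'⟩
      | rel h' => exact Or.inl h'
    · injection h with h1 h2
      exact Or.inr ⟨h1, le_of_eq h2⟩
  · intro h
    rcases h with h | ⟨rfl, h⟩
    · exact le_of_lt (List.Lex.rel h)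
    · rcases lt_or_eq_of_le h with h | h
      · exact le_of_lt (List.Lex.cons h)
      · exact le_of_eq (by rw [h])

-- anything lexicographically between a and an extension of a itself extends a
lemma pv_between : ∀ (a b c : List Char), a ≤ b → b ≤ c → a <+: c → a <+: b
  | [], _, _, _, _, _ => List.nil_prefix
  | x :: a', b, c, hab, hbc, hpre => by
    obtain ⟨t, rfl⟩ := hpre
    cases b with
    | nil => exact absurd hab (pv_not_cons_le_nil _ _)
    | cons y b' =>
      rcases pv_cons_le_cons_iff.mp hab with h1 | ⟨rfl, h1⟩
      · rcases pv_cons_le_cons_iff.mp hbc with h2 | ⟨rfl, h2⟩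
        · exact absurd h2 (lt_asymm h1)
        · exact absurd h1 (lt_irrefl _)
      · rcases pv_cons_le_cons_iff.mp hbc with h2 | ⟨_, h2⟩
        · exact absurd h2 (lt_irrefl _)
        · exact List.cons_prefix_cons.mpr
            ⟨rfl, pv_between a' b' (a' ++ t) h1 h2 (List.prefix_append a' t)⟩

lemma pv_take_min_iff (x y : List Char) :
    (x.take (min x.length y.length) = y.take (min x.length y.length)) ↔
      (x <+: y ∨ y <+: x) := by
  rcases le_total x.length y.length with h | h
  · rw [min_eq_left h, List.take_of_length_le (le_refl x.length)]
    constructor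
    · intro he; exact Or.inl (List.prefix_iff_eq_take.mpr he)
    · rintro (hp | hp)
      · exact List.prefix_iff_eq_take.mp hp
      · have : y = x := hp.eq_of_length_le h
        subst this; simp
  · rw [min_eq_right h, List.take_of_length_le (le_refl y.length)]
    constructor
    · intro he; exact Or.inr (List.prefix_iff_eq_take.mpr he.symm)
    · rintro (hp | hp)
      · have : x = y := hp.eq_of_length_le h
        subst this; simp
      · exact (List.prefix_iff_eq_take.mp hp).symm

-- A's per-pair test means: distinct, and one a prefix of the other
lemma pv_condA_iff (x y : String) :
    ((if x == y then false
      else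
        (PySem.List.slice x.toList none (some (min (PySem.Str.len x) (PySem.Str.len y))) ==
          PySem.List.slice y.toList none (some (min (PySem.Str.len x) (PySem.Str.len y))))) = true)
    ↔ (x ≠ y ∧ (x.toList <+: y.toList ∨ y.toList <+: x.toList)) := by
  by_cases hxy : x = y
  · simp [hxy]
  · have hm : (0 : Int) ≤ min (PySem.Str.len x) (PySem.Str.len y) := by
      simp [PySem.Str.len_eq]
    rw [if_neg (by simpa using hxy)]
    rw [PySem.List.slice_to _ hm, PySem.List.slice_to _ hm]
    have ht : (min (PySem.Str.len x) (PySem.Str.len y)).toNat =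
        min x.toList.length y.toList.length := by
      simp [PySem.Str.len_eq]
      omega
    rw [ht]
    simp only [beq_iff_eq]
    rw [pv_take_min_iff]
    simp [hxy]

lemma pv_A_any_iff (l : List String) :
    ((PySem.List.pyRange 0 (PySem.List.len l) 1).any (fun i =>
       (PySem.List.pyRange (i + 1) (PySem.List.len l) 1).any (fun j =>
         let pi := PySem.List.pyGetD l i ""
         let pj := PySem.List.pyGetD l j ""
         if pi == pj then false
         else
           let minLen := min (PySem.Str.len pi) (PySem.Str.len pj)
           PySem.List.slice pi.toList none (some minLen) ==
             PySem.List.slice pj.toList none (some minLen))) = true)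
    ↔ pvQ l := by
  simp only [List.any_eq_true, PySem.List.mem_pyRange_one, PySem.List.len_eq]
  constructor
  · rintro ⟨i, ⟨hi0, hilen⟩, j, ⟨hij, hjlen⟩, hcond⟩
    have hi' : i.toNat < l.length := by omega
    have hj' : j.toNat < l.length := by omega
    rw [PySem.List.pyGetD_eq_getElem l "" hi0 hilen,
        PySem.List.pyGetD_eq_getElem l "" (by omega) hjlen] at hcond
    rw [pv_condA_iff] at hcond
    obtain ⟨hne, hp | hp⟩ := hcond
    · exact ⟨_, l.getElem_mem hi', _, l.getElem_mem hj', hne, hp⟩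
    · exact ⟨_, l.getElem_mem hj', _, l.getElem_mem hi', Ne.symm hne, hp⟩
  · rintro ⟨x, hx, y, hy, hne, hp⟩
    obtain ⟨i, hi, hxe⟩ := List.mem_iff_getElem.mp hx
    obtain ⟨j, hj, hye⟩ := List.mem_iff_getElem.mp hy
    have hij : i ≠ j := by
      rintro rfl
      exact hne (hxe ▸ hye ▸ rfl)
    rcases Nat.lt_or_ge i j with hlt | hge
    · refine ⟨(i : Int), ⟨by omega, by omega⟩, (j : Int), ⟨by omega, by omega⟩, ?_⟩
      rw [PySem.List.pyGetD_eq_getElem l "" (by omega) (by omega),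
          PySem.List.pyGetD_eq_getElem l "" (by omega) (by omega)]
      simp only [Int.toNat_natCast]
      rw [hxe, hye]
      exact (pv_condA_iff _ _).mpr ⟨hne, Or.inl hp⟩
    · have hlt : j < i := by omega
      refine ⟨(j : Int), ⟨by omega, by omega⟩, (i : Int), ⟨by omega, by omega⟩, ?_⟩
      rw [PySem.List.pyGetD_eq_getElem l "" (by omega) (by omega),
          PySem.List.pyGetD_eq_getElem l "" (by omega) (by omega)]
      simp only [Int.toNat_natCast]
      rw [hxe, hye]
      exact (pv_condA_iff _ _).mpr ⟨Ne.symm hne, Or.inr hp⟩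

lemma pv_F_iff (a b : String) : pvF (a, b) = true ↔ a ≠ b ∧ a.toList <+: b.toList := by
  simp [pvF, PySem.Str.startswith_eq, PySem.Chars.startswith_iff]

-- soundness of the adjacent scan
lemma pv_B_sound : ∀ l : List String, ((l.zip l.tail).any pvF = true) → pvQ l
  | [] => by simp
  | [a] => by simp
  | a :: b :: t => by
    intro h
    simp only [List.tail_cons, List.zip_cons_cons, List.any_cons, Bool.or_eq_true] at h
    rcases h with h | h
    · obtain ⟨hne, hp⟩ := (pv_F_iff a b).mp h
      exact ⟨a, List.mem_cons_self, b, List.mem_cons_of_mem _ List.mem_cons_self, hne, hp⟩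
    · obtain ⟨x, hx, y, hy, hne, hp⟩ := pv_B_sound (b :: t) (by simpa using h)
      exact ⟨x, List.mem_cons_of_mem _ hx, y, List.mem_cons_of_mem _ hy, hne, hp⟩

-- completeness of the adjacent scan on a sorted list
lemma pv_B_complete : ∀ l : List String, l.Pairwise (· ≤ ·) → pvQ l →
    ((l.zip l.tail).any pvF = true)
  | [] => by rintro _ ⟨x, hx, _⟩; simp at hx
  | [a] => by
    rintro _ ⟨x, hx, y, hy, hne, _⟩
    simp at hx hy; subst hx; subst hy; exact absurd rfl hne
  | a :: b :: t => by
    rintro hp ⟨x, hx, y, hy, hne, hpre⟩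
    have hhead : ∀ z ∈ b :: t, a ≤ z := (List.pairwise_cons.mp hp).1
    have htailp : (b :: t).Pairwise (· ≤ ·) := (List.pairwise_cons.mp hp).2
    simp only [List.tail_cons, List.zip_cons_cons, List.any_cons, Bool.or_eq_true]
    have htail_goal : pvQ (b :: t) →
        (pvF (a, b) = true ∨ ((b :: t).zip t).any pvF = true) := by
      intro hq
      right
      simpa using pv_B_complete (b :: t) htailp hq
    rcases List.mem_cons.mp hx with hxa | hx
    · rcases List.mem_cons.mp hy with hya | hy
      · exact absurd (hxa.trans hya.symm) hne
      · -- x = a and y is in the tail: a is then a (proper) prefix of b as well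
        have hxble : x ≤ b := by rw [hxa]; exact hhead b List.mem_cons_self
        rcases List.mem_cons.mp hy with hyb | hy'
        · refine Or.inl ((pv_F_iff a b).mpr ⟨?_, ?_⟩)
          · rw [← hxa, ← hyb]; exact hne
          · rw [← hxa, ← hyb]; exact hpre
        · have hby : b ≤ y := (List.pairwise_cons.mp htailp).1 y hy'
          have hpab : x.toList <+: b.toList :=
            pv_between x.toList b.toList y.toList
              (String.le_iff_toList_le.mp hxble) (String.le_iff_toList_le.mp hby) hpre
          by_cases hxb : x = b
          · refine htail_goal ⟨b, List.mem_cons_self, y, List.mem_cons_of_mem _ hy', ?_, ?_⟩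
            · rw [← hxb]; exact hne
            · rw [← hxb]; exact hpre
          · refine Or.inl ((pv_F_iff a b).mpr ⟨?_, ?_⟩)
            · rw [← hxa]; exact hxb
            · rw [← hxa]; exact hpab
    · rcases List.mem_cons.mp hy with hya | hy
      · -- y = a and x in the tail: x would be a proper prefix of the minimum — impossible
        have hax : y ≤ x := by rw [hya]; exact hhead x hx
        have hlt : x < y := String.lt_iff_toList_lt.mpr
          (pv_proper_prefix_lt hpre (fun h => hne (String.toList_inj.mp h)))
        exact absurd hax (not_le_of_gt hlt)
      · exact htail_goal ⟨x, hx, y, hy, hne, hpre⟩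

lemma pv_B_any_iff (l : List String) :
    (((PySem.List.sorted l (fun x => x) false).zip
        (PySem.List.slice (PySem.List.sorted l (fun x => x) false) (some 1) none)).any
      (fun ab => ab.1 != ab.2 && PySem.Str.startswith ab.2 ab.1) = true)
    ↔ pvQ l := by
  rw [PySem.List.slice_from_one]
  show ((PySem.List.sorted l (fun x => x) false).zip
        (PySem.List.sorted l (fun x => x) false).tail).any pvF = true ↔ pvQ l
  constructor
  · intro h
    obtain ⟨x, hx, y, hy, hne, hp⟩ := pv_B_sound _ h
    rw [PySem.List.mem_sorted] at hx hy
    exact ⟨x, hx, y, hy, hne, hp⟩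
  · rintro ⟨x, hx, y, hy, hne, hp⟩
    apply pv_B_complete _ (PySem.List.sorted_pairwise l (fun x => x))
    exact ⟨x, (PySem.List.mem_sorted l (fun x => x) false x).mpr hx, y,
      (PySem.List.mem_sorted l (fun x => x) false y).mpr hy, hne, hp⟩

-- ===== VERDICT (by name: the statement is the Claim_ definition above) =====
theorem check_passwords_spec : Claim_equal_check_passwords := by
  intro passwords _
  unfold Spec_check_passwords check_passwords check_passwords_alt
  by_cases hq : pvQ passwords
  · rw [if_pos ((pv_A_any_iff passwords).mpr hq),
        if_pos ((pv_B_any_iff passwords).mpr hq)]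
  · rw [if_neg (fun h => hq ((pv_A_any_iff passwords).mp h)),
        if_neg (fun h => hq ((pv_B_any_iff passwords).mp h))]
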